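-- pv_equiv track=rewrite | github.com/codesterDiv/school-assignment | assignment 3/assignment 17.py | swap_string
-- ===== SOURCE A (Python) =====
-- def swap_string(s):
--     result = ''
--     for c in s:
--         if 'a' <= c <= 'z':
--             result += chr(ord('x') + (ord(c) - ord('a')) % 3)
--         else:
--             result += c
--     return result
-- ===== SOURCE B (Python) =====
-- def swap_string(s):
--     # Divide and conquer: split the string in half, transform each half
--     # recursively, and join; a one-character string is transformed directly.
--     if len(s) <= 1:
--         if s and 'a' <= s <= 'z':
--             return chr(120 + (ord(s) - 97) % 3)
--         return s
--     mid = len(s) // 2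
--     return swap_string(s[:mid]) + swap_string(s[mid:])
-- ===== Notes on version B (the rewrite author's own statement) =====
-- stated objective: alternative
-- what changed: Replaced A's left-to-right loop with a string-concatenation accumulator by a divide-and-conquer recursion that halves the string, transforms each half recursively and joins, with the single-character base case doing the letter arithmetic.
import Mathlib
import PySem

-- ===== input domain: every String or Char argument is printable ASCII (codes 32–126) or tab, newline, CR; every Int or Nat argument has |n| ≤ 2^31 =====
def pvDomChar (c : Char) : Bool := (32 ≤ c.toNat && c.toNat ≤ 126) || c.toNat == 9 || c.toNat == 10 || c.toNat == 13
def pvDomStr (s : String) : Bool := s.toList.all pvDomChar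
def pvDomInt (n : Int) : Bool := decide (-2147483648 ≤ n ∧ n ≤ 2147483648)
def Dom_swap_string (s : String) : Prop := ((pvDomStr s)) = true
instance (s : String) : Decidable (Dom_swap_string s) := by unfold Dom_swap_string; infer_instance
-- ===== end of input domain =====

-- B replaces A's left-to-right accumulator loop by a divide-and-conquer recursion
-- (halve, recurse, join); objective: alternative decomposition, same result.

-- ===== PORT A =====
-- literal port: result accumulated by string concatenation over the characters of s
def swap_string (s : String) : String :=
  String.ofList (s.toList.foldl
    (fun result c =>
      result ++ [if 'a' ≤ c ∧ c ≤ 'z'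
                 then Char.ofNat (((120 : Int) + PySem.Int.mod ((c.toNat : Int) - 97) 3).toNat)
                 else c])
    [])

-- ===== PORT B =====
-- literal port of Source B's divide-and-conquer on the character list:
-- s[:mid] / s[mid:] with mid = len(s)//2 ≥ 0 are exactly take/drop mid
def pvAltGo (l : List Char) : List Char :=
  if h : l.length ≤ 1 then
    match l with
    | [] => []
    | c :: _ =>
        [if 'a' ≤ c ∧ c ≤ 'z'
         then Char.ofNat (((120 : Int) + PySem.Int.mod ((c.toNat : Int) - 97) 3).toNat)
         else c]
  else
    pvAltGo (l.take (l.length / 2)) ++ pvAltGo (l.drop (l.length / 2))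
termination_by l.length
decreasing_by
  · simp only [List.length_take]; omega
  · simp only [List.length_drop]; omega

def swap_string_alt (s : String) : String :=
  String.ofList (pvAltGo s.toList)

-- ===== PRECONDITION & SPEC =====
def Spec_swap_string (s : String) (out : String) : Prop := out = swap_string_alt s
instance (s : String) (out : String) : Decidable (Spec_swap_string s out) := by unfold Spec_swap_string; infer_instance

-- ===== CLAIM (what is proved, stated in full; the proofs are below) =====
def Claim_equal_swap_string : Prop := ∀ (s : String), Dom_swap_string s → Spec_swap_string s (swap_string s)

-- ===== LEMMAS AND PROOFS =====

-- the per-character transform both ports use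
def pvf (c : Char) : Char :=
  if 'a' ≤ c ∧ c ≤ 'z'
  then Char.ofNat (((120 : Int) + PySem.Int.mod ((c.toNat : Int) - 97) 3).toNat)
  else c

-- B's divide-and-conquer computes the per-character map
theorem pvAltGo_eq_map (l : List Char) : pvAltGo l = l.map pvf := by
  induction l using pvAltGo.induct with
  | case1 _ _ => simp [pvAltGo]
  | case2 c rest h _ =>
      have : rest = [] := by
        simp only [List.length_cons] at h; exact List.eq_nil_of_length_eq_zero (by omega)
      subst this
      simp [pvAltGo, pvf]
  | case3 l h ih1 ih2 =>
      rw [pvAltGo, dif_neg h, ih1, ih2, ← List.map_append, List.take_append_drop]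

-- ===== VERDICT (by name: the statement is the Claim_ definition above) =====
theorem swap_string_spec : Claim_equal_swap_string := by
  intro s _
  unfold Spec_swap_string swap_string swap_string_alt
  rw [pvAltGo_eq_map, PySem.List.foldl_append_singleton_eq_map]
  rfl
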